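-- pv_equiv track=rewrite | github.com/beelsebob/MinecraftCurve | Curve.py | get_block_orientation
-- ===== SOURCE A (Python) =====
-- def get_block_orientation(name, pat):
--     """
--     Returns orientation string depending on block type.
--     """
--
--     H = len(pat)
--     W = len(pat[0])
--
--     top = sum(sum(r) for r in pat[H//2:]) > sum(sum(r) for r in pat[:H//2])
--     left = sum(row[:W//2].count(1) for row in pat) > sum(row[W//2:].count(1) for row in pat)
--
--     # Slabs / closed trapdoors
--     if name in ("slab", "trapdoor_closed"):
--         return "top" if top else "bottom"
--
--     # Shelf / open trapdoors
--     if name in ("shelf", "trapdoor_open"):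
--         return "left" if left else "right"
--
--     # Stair (quadrants)
--     if name == "stair":
--         if top and left:
--             return "tl"
--         elif top and not left:
--             return "tr"
--         elif not top and left:
--             return "bl"
--         else:
--             return "br"
--
--     return "none"
-- ===== SOURCE B (Python) =====
-- def get_block_orientation(name, pat):
--     """
--     Returns orientation string depending on block type.
--     """
--     H = len(pat)
--     W = len(pat[0])
--     h2 = H // 2
--     w2 = W // 2
--     top_sum = bot_sum = left_count = right_count = 0
--     for i, row in enumerate(pat):
--         for j, v in enumerate(row):
--             if i >= h2:
--                 top_sum += v
--             else:
--                 bot_sum += v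
--             if v == 1:
--                 if j < w2:
--                     left_count += 1
--                 else:
--                     right_count += 1
--     top = top_sum > bot_sum
--     left = left_count > right_count
--     if name in ("slab", "trapdoor_closed"):
--         return "top" if top else "bottom"
--     if name in ("shelf", "trapdoor_open"):
--         return "left" if left else "right"
--     if name == "stair":
--         if top and left:
--             return "tl"
--         elif top and not left:
--             return "tr"
--         elif not top and left:
--             return "bl"
--         else:
--             return "br"
--     return "none"
-- ===== Notes on version B (the rewrite author's own statement) =====
-- stated objective: alternative
-- what changed: Replaced the four separate slice/comprehension scans (two sum-of-sums slices for top/bottom, two count(1) slices for left/right) by a single nested enumerate pass that maintains four accumulators and classifies each cell by its row/column index against H//2 and W//2.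
import Mathlib
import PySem

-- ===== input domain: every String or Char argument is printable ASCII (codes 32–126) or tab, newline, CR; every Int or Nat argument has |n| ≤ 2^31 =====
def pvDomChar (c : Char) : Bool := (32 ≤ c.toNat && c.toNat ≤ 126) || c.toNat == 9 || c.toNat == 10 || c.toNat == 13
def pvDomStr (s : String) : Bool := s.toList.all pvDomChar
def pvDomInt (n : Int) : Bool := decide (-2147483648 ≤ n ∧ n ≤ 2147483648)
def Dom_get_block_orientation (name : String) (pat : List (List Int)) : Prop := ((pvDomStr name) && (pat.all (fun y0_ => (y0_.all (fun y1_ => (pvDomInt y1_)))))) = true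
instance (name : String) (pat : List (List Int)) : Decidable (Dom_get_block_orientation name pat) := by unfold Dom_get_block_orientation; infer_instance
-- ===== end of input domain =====

-- B replaces A's four separate slice scans by one nested index-classifying pass (alternative decomposition, same cost).

-- ===== PORT A =====
def get_block_orientation (name : String) (pat : List (List Int)) : String :=
  let H : Int := pat.length
  let W : Int := ((PySem.List.pyGet? pat 0).getD []).length
  let top : Bool :=
    decide (((PySem.List.slice pat (some (PySem.Int.floordiv H 2)) none).map (fun r => r.sum)).sum >
            ((PySem.List.slice pat none (some (PySem.Int.floordiv H 2))).map (fun r => r.sum)).sum)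
  let left : Bool :=
    decide ((pat.map (fun row => (PySem.List.count (PySem.List.slice row none (some (PySem.Int.floordiv W 2))) 1 : Int))).sum >
            (pat.map (fun row => (PySem.List.count (PySem.List.slice row (some (PySem.Int.floordiv W 2)) none) 1 : Int))).sum)
  if name = "slab" ∨ name = "trapdoor_closed" then
    (if top then "top" else "bottom")
  else if name = "shelf" ∨ name = "trapdoor_open" then
    (if left then "left" else "right")
  else if name = "stair" then
    (if top && left then "tl"
     else if top && !left then "tr"
     else if !top && left then "bl"
     else "br")
  else "none"

-- ===== PORT B =====
-- one cell: classify v by row index i (vs h2) and column index j (vs w2)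
def pvStepCell (h2 w2 i : Int) (acc : Int × Int × Int × Int) (jv : Int × Int) : Int × Int × Int × Int :=
  let acc1 : Int × Int × Int × Int :=
    if i ≥ h2 then (acc.1 + jv.2, acc.2.1, acc.2.2.1, acc.2.2.2)
    else (acc.1, acc.2.1 + jv.2, acc.2.2.1, acc.2.2.2)
  if jv.2 = 1 then
    (if jv.1 < w2 then (acc1.1, acc1.2.1, acc1.2.2.1 + 1, acc1.2.2.2)
     else (acc1.1, acc1.2.1, acc1.2.2.1, acc1.2.2.2 + 1))
  else acc1

def pvStepRow (h2 w2 : Int) (acc : Int × Int × Int × Int) (ir : Int × List Int) : Int × Int × Int × Int :=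
  (PySem.List.enumerate ir.2 0).foldl (pvStepCell h2 w2 ir.1) acc

def get_block_orientation_alt (name : String) (pat : List (List Int)) : String :=
  let H : Int := pat.length
  let W : Int := ((PySem.List.pyGet? pat 0).getD []).length
  let h2 : Int := PySem.Int.floordiv H 2
  let w2 : Int := PySem.Int.floordiv W 2
  let st : Int × Int × Int × Int :=
    (PySem.List.enumerate pat 0).foldl (pvStepRow h2 w2) (0, 0, 0, 0)
  let top : Bool := decide (st.1 > st.2.1)
  let left : Bool := decide (st.2.2.1 > st.2.2.2)
  if name = "slab" ∨ name = "trapdoor_closed" then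
    (if top then "top" else "bottom")
  else if name = "shelf" ∨ name = "trapdoor_open" then
    (if left then "left" else "right")
  else if name = "stair" then
    (if top && left then "tl"
     else if top && !left then "tr"
     else if !top && left then "bl"
     else "br")
  else "none"

-- ===== PRECONDITION & SPEC =====
-- Pre_ excludes only the empty pattern, on which both Pythons raise IndexError at pat[0].
def Pre_get_block_orientation (name : String) (pat : List (List Int)) : Prop := pat ≠ []
instance (name : String) (pat : List (List Int)) : Decidable (Pre_get_block_orientation name pat) := by unfold Pre_get_block_orientation; infer_instance
def pvWitness_get_block_orientation : String × List (List Int) := ("stair", [[1, 0], [0, 1]])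

def Spec_get_block_orientation (name : String) (pat : List (List Int)) (out : String) : Prop := out = get_block_orientation_alt name pat
instance (name : String) (pat : List (List Int)) (out : String) : Decidable (Spec_get_block_orientation name pat out) := by unfold Spec_get_block_orientation; infer_instance

-- ===== CLAIM (what is proved, stated in full; the proofs are below) =====
def Claim_equal_get_block_orientation : Prop := ∀ (name : String) (pat : List (List Int)), Dom_get_block_orientation name pat → Pre_get_block_orientation name pat → Spec_get_block_orientation name pat (get_block_orientation name pat)

-- ===== LEMMAS AND PROOFS =====

-- inner loop over one row: adds row.sum to the top (resp. bottom) slot, and the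
-- index-classified 1-counts to the left/right slots
theorem pvStepRow_inner (h2 w2 i : Int) (row : List Int) : ∀ (s : Int) (acc : Int × Int × Int × Int),
    (PySem.List.enumerate row s).foldl (pvStepCell h2 w2 i) acc =
      (acc.1 + (if h2 ≤ i then row.sum else 0),
       acc.2.1 + (if h2 ≤ i then 0 else row.sum),
       acc.2.2.1 + ((PySem.List.enumerate row s).countP (fun jv => jv.2 = 1 ∧ jv.1 < w2) : Int),
       acc.2.2.2 + ((PySem.List.enumerate row s).countP (fun jv => jv.2 = 1 ∧ ¬ jv.1 < w2) : Int)) := by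
  induction row with
  | nil => intro s acc; simp [PySem.List.enumerate_nil]
  | cons x xs ih =>
      intro s acc
      rw [PySem.List.enumerate_cons]
      simp only [List.foldl_cons, ih, List.countP_cons, pvStepCell]
      by_cases hx : x = 1 <;> by_cases hs : s < w2 <;> by_cases hi : h2 ≤ i <;>
        simp only [hx, hs, hi, if_true, if_false, ge_iff_le, and_true, and_false,
          decide_true, decide_false, if_pos, not_lt, not_true, not_false_iff] <;>
        refine Prod.ext ?_ (Prod.ext ?_ (Prod.ext ?_ ?_)) <;> simp [hx, hs, hi] <;> push_cast <;> ring

-- index-bounded 1-counts over an enumeration are counts over take / drop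
theorem pvCntL (row : List Int) : ∀ (s w : Nat),
    (PySem.List.enumerate row (s : Int)).countP (fun jv => jv.2 = 1 ∧ jv.1 < ((w : Nat) : Int)) =
      (row.take (w - s)).count 1 := by
  induction row with
  | nil => intro s w; simp [PySem.List.enumerate_nil]
  | cons x xs ih =>
      intro s w
      rw [PySem.List.enumerate_cons]
      have h1 : ((s : Int) + 1) = ((s + 1 : Nat) : Int) := by push_cast; ring
      simp only [List.countP_cons, h1, ih]
      by_cases hs : s < w
      · have ht : w - s = (w - (s+1)) + 1 := by omega
        rw [ht, List.take_succ_cons, List.count_cons]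
        by_cases hx : x = 1 <;> simp [hx, hs] <;> omega
      · have ht : w - s = 0 := by omega
        have ht2 : w - (s+1) = 0 := by omega
        rw [ht, ht2]
        simp <;> omega

theorem pvCntR (row : List Int) : ∀ (s w : Nat),
    (PySem.List.enumerate row (s : Int)).countP (fun jv => jv.2 = 1 ∧ ¬ jv.1 < ((w : Nat) : Int)) =
      (row.drop (w - s)).count 1 := by
  induction row with
  | nil => intro s w; simp [PySem.List.enumerate_nil]
  | cons x xs ih =>
      intro s w
      rw [PySem.List.enumerate_cons]
      have h1 : ((s : Int) + 1) = ((s + 1 : Nat) : Int) := by push_cast; ring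
      simp only [List.countP_cons, h1, ih]
      by_cases hs : s < w
      · have ht : w - s = (w - (s+1)) + 1 := by omega
        rw [ht, List.drop_succ_cons]
        simp [hs] <;> omega
      · have ht : w - s = 0 := by omega
        have ht2 : w - (s+1) = 0 := by omega
        rw [ht, ht2]
        simp only [List.drop_zero, List.count_cons]
        by_cases hx : x = 1 <;> simp [hx] <;> omega

-- the whole pass: each slot is the corresponding aggregate
theorem pvOuter (h2 w2 : Int) (pat : List (List Int)) : ∀ (s : Int) (acc : Int × Int × Int × Int),
    (PySem.List.enumerate pat s).foldl (pvStepRow h2 w2) acc =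
      (acc.1 + (((PySem.List.enumerate pat s).filter (fun ir => h2 ≤ ir.1)).map (fun ir => ir.2.sum)).sum,
       acc.2.1 + (((PySem.List.enumerate pat s).filter (fun ir => ¬ h2 ≤ ir.1)).map (fun ir => ir.2.sum)).sum,
       acc.2.2.1 + (pat.map (fun row => ((PySem.List.enumerate row 0).countP (fun jv => jv.2 = 1 ∧ jv.1 < w2) : Int))).sum,
       acc.2.2.2 + (pat.map (fun row => ((PySem.List.enumerate row 0).countP (fun jv => jv.2 = 1 ∧ ¬ jv.1 < w2) : Int))).sum) := by
  induction pat with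
  | nil => intro s acc; simp [PySem.List.enumerate_nil]
  | cons r rs ih =>
      intro s acc
      rw [PySem.List.enumerate_cons]
      simp only [List.foldl_cons]
      have hstep : pvStepRow h2 w2 acc (s, r) =
          (acc.1 + (if h2 ≤ s then r.sum else 0),
           acc.2.1 + (if h2 ≤ s then 0 else r.sum),
           acc.2.2.1 + ((PySem.List.enumerate r 0).countP (fun jv => jv.2 = 1 ∧ jv.1 < w2) : Int),
           acc.2.2.2 + ((PySem.List.enumerate r 0).countP (fun jv => jv.2 = 1 ∧ ¬ jv.1 < w2) : Int)) :=
        pvStepRow_inner h2 w2 s r 0 acc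
      rw [hstep, ih]
      by_cases hs : h2 ≤ s
      · have hs' : ¬ s < h2 := not_lt.mpr hs
        refine Prod.ext ?_ (Prod.ext ?_ (Prod.ext ?_ ?_)) <;> simp [hs, hs'] <;> ring
      · have hs' : s < h2 := not_le.mp hs
        refine Prod.ext ?_ (Prod.ext ?_ (Prod.ext ?_ ?_)) <;> simp [hs, hs'] <;> ring

-- filtering an enumeration by 'index ≥ k' (k ≤ length) keeps exactly the dropped tail
theorem pvFilterGe (pat : List (List Int)) (k : Nat) (hk : k ≤ pat.length) :
    ((PySem.List.enumerate pat 0).filter (fun ir => ((k : Nat) : Int) ≤ ir.1)).map (fun ir => ir.2.sum) =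
      (pat.drop k).map (fun r => r.sum) := by
  conv_lhs => rw [← List.take_append_drop k pat]
  rw [PySem.List.enumerate_append, List.filter_append, List.map_append]
  have h1 : (PySem.List.enumerate (pat.take k) 0).filter (fun ir => ((k : Nat) : Int) ≤ ir.1) = [] := by
    rw [List.filter_eq_nil_iff]
    intro p hp
    obtain ⟨j, hj, rfl⟩ := (PySem.List.mem_enumerate_iff _ _ _).1 hp
    have hl : (pat.take k).length ≤ k := by simp
    simp only [decide_eq_true_eq, not_le]
    omega
  have h2 : (PySem.List.enumerate (pat.drop k) (0 + (pat.take k).length)).filter (fun ir => ((k : Nat) : Int) ≤ ir.1) =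
      PySem.List.enumerate (pat.drop k) (0 + (pat.take k).length) := by
    rw [List.filter_eq_self]
    intro p hp
    obtain ⟨j, hj, rfl⟩ := (PySem.List.mem_enumerate_iff _ _ _).1 hp
    have hl : (pat.take k).length = k := by simp [Nat.min_eq_left hk]
    simp only [hl, decide_eq_true_eq, not_le]
    omega
  rw [h1, h2]
  have h3 := PySem.List.map_snd_enumerate (pat.drop k) (0 + ((pat.take k).length : Int))
  simp only [List.map_nil, List.nil_append]
  calc ((PySem.List.enumerate (pat.drop k) (0 + ((pat.take k).length : Int))).map (fun ir => ir.2.sum))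
      = ((PySem.List.enumerate (pat.drop k) (0 + ((pat.take k).length : Int))).map (fun ir => ir.2)).map (fun r => r.sum) := by
        rw [List.map_map]; rfl
    _ = (pat.drop k).map (fun r => r.sum) := by rw [h3]

theorem pvFilterLt (pat : List (List Int)) (k : Nat) (hk : k ≤ pat.length) :
    ((PySem.List.enumerate pat 0).filter (fun ir => ¬ ((k : Nat) : Int) ≤ ir.1)).map (fun ir => ir.2.sum) =
      (pat.take k).map (fun r => r.sum) := by
  conv_lhs => rw [← List.take_append_drop k pat]
  rw [PySem.List.enumerate_append, List.filter_append, List.map_append]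
  have h1 : (PySem.List.enumerate (pat.take k) 0).filter (fun ir => decide (¬ ((k : Nat) : Int) ≤ ir.1)) =
      PySem.List.enumerate (pat.take k) 0 := by
    rw [List.filter_eq_self]
    intro p hp
    obtain ⟨j, hj, rfl⟩ := (PySem.List.mem_enumerate_iff _ _ _).1 hp
    have hl : (pat.take k).length ≤ k := by simp
    simp only [decide_eq_true_eq, not_le]
    omega
  have h2 : (PySem.List.enumerate (pat.drop k) (0 + (pat.take k).length)).filter (fun ir => decide (¬ ((k : Nat) : Int) ≤ ir.1)) = [] := by
    rw [List.filter_eq_nil_iff]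
    intro p hp
    obtain ⟨j, hj, rfl⟩ := (PySem.List.mem_enumerate_iff _ _ _).1 hp
    have hl : (pat.take k).length = k := by simp [Nat.min_eq_left hk]
    simp only [hl, decide_eq_true_eq, not_le]
    omega
  rw [h1, h2]
  have h3 := PySem.List.map_snd_enumerate (pat.take k) (0 : Int)
  simp only [List.map_nil, List.append_nil]
  calc ((PySem.List.enumerate (pat.take k) 0).map (fun ir => ir.2.sum))
      = ((PySem.List.enumerate (pat.take k) 0).map (fun ir => ir.2)).map (fun r => r.sum) := by
        rw [List.map_map]; rfl
    _ = (pat.take k).map (fun r => r.sum) := by rw [h3]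

-- ===== VERDICT (by name: the statement is the Claim_ definition above) =====
theorem get_block_orientation_spec : Claim_equal_get_block_orientation := by
  intro name pat _hdom hpre
  simp only [Spec_get_block_orientation, get_block_orientation, get_block_orientation_alt]
  have hk : pat.length / 2 ≤ pat.length := Nat.div_le_self _ _
  have hH : PySem.Int.floordiv ((pat.length : Nat) : Int) 2 = ((pat.length / 2 : Nat) : Int) := by
    exact_mod_cast PySem.Int.floordiv_natCast pat.length 2
  set Wn : Nat := ((PySem.List.pyGet? pat 0).getD []).length with hWn
  have hW : PySem.Int.floordiv ((Wn : Nat) : Int) 2 = ((Wn / 2 : Nat) : Int) := by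
    exact_mod_cast PySem.Int.floordiv_natCast Wn 2
  rw [pvOuter]
  simp only [hH, hW]
  rw [pvFilterGe pat (pat.length / 2) hk, pvFilterLt pat (pat.length / 2) hk,
      PySem.List.slice_from_natCast, PySem.List.slice_to_natCast]
  have hrow : ∀ row : List Int,
      ((PySem.List.enumerate row 0).countP (fun jv => jv.2 = 1 ∧ jv.1 < ((Wn / 2 : Nat) : Int)) : Int) =
        (PySem.List.count (PySem.List.slice row none (some ((Wn / 2 : Nat) : Int))) 1 : Int) := by
    intro row
    rw [PySem.List.slice_to_natCast, PySem.List.count_eq]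
    have := pvCntL row 0 (Wn / 2)
    simp only [Nat.sub_zero, Nat.cast_zero] at this
    rw [this]
  have hrow2 : ∀ row : List Int,
      ((PySem.List.enumerate row 0).countP (fun jv => jv.2 = 1 ∧ ¬ jv.1 < ((Wn / 2 : Nat) : Int)) : Int) =
        (PySem.List.count (PySem.List.slice row (some ((Wn / 2 : Nat) : Int)) none) 1 : Int) := by
    intro row
    rw [PySem.List.slice_from_natCast, PySem.List.count_eq]
    have := pvCntR row 0 (Wn / 2)
    simp only [Nat.sub_zero, Nat.cast_zero] at this
    rw [this]
  simp only [hrow, hrow2, zero_add]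

-- ===== AXIOM-FREE =====
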